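-- pv_equiv track=rewrite | github.com/programmingBae/Codewars-Solutions | Python/5 KYU/ISBN-10 Validation.py | valid_ISBN10
-- ===== SOURCE A (Python) =====
-- def valid_ISBN10(isbn):
--     if len(isbn) < 10 or isbn.isalpha() or len(isbn) > 10:
--         return False
--     a = 0
--     for i in range (0,len(isbn)):
--         if isbn[i].isdecimal():
--             a += int(isbn[i]) * (i+1)
--         elif isbn[i] == "X" and i == 9:
--             a += 10 * (i+1)
--         else:
--             return False
--     # your code here
--     if a % 11 == 0:
--         return True
--     else:
--         return False
-- ===== SOURCE B (Python) =====
-- def valid_ISBN10(isbn):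
--     # Different algorithm: the classic "double cumulative sum" ISBN-10 check.
--     # Running totals t (sum of digits so far) and s (sum of running totals)
--     # give s = sum((10 - i) * d_i), and since sum((i+1)*d_i) + s = 11*sum(d_i),
--     # s is divisible by 11 exactly when A's weighted sum is. No index weights
--     # or multiplications are needed.
--     if len(isbn) != 10:
--         return False
--     t = s = 0
--     for c in isbn[:9]:
--         if not c.isdecimal():
--             return False
--         t += int(c)
--         s += t
--     last = isbn[9]
--     if last == "X":
--         t += 10
--     elif last.isdecimal():
--         t += int(last)
--     else:
--         return False
--     s += t
--     return s % 11 == 0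
-- ===== Notes on version B (the rewrite author's own statement) =====
-- stated objective: alternative
-- what changed: B replaces A's positional weighted sum sum((i+1)*d_i) by the classic double-cumulative-sum ISBN check (t += d; s += t), which needs no index weights or multiplications; s = sum((10-i)*d_i) and s + sum((i+1)*d_i) = 11*sum(d_i), so s is divisible by 11 exactly when A's sum is.
import Mathlib
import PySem

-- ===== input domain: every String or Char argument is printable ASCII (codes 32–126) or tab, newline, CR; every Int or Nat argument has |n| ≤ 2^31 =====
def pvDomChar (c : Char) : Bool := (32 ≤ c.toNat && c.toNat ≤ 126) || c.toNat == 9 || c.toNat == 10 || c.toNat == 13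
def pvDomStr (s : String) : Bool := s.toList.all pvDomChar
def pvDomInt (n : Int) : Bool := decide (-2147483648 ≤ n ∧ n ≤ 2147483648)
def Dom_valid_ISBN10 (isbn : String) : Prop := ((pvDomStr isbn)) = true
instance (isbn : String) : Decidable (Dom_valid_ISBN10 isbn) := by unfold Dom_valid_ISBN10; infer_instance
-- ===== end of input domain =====

-- B replaces A's positional weighted sum by the double-cumulative-sum ISBN check (t += d; s += t):
-- s = Σ(10-i)·d_i and s + Σ(i+1)·d_i = 11·Σd_i, so divisibility by 11 agrees; same return value as A.

-- int(c) for a single character c (both Pythons apply int() only to characters the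
-- surrounding guard has already checked to be decimal digits)
def pvDigitInt (c : Char) : Int := (PySem.Int.ofChars? [c]).getD 0

-- ===== PORT A =====
-- the for-loop of A over the indexed characters: `none` where A does `return False`
-- (isdecimal() ported as PySem.Chars.isdigit: the two agree on the printable-ASCII domain)
def pvLoopA : List (Int × Char) → Int → Option Int
  | [], a => some a
  | (i, c) :: rest, a =>
    if PySem.Chars.isdigit c then pvLoopA rest (a + pvDigitInt c * (i + 1))
    else if c = 'X' ∧ i = 9 then pvLoopA rest (a + 10 * (i + 1))
    else none

def valid_ISBN10 (isbn : String) : Bool :=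
  let cs := isbn.toList
  if cs.length < 10 ∨ PySem.Chars.strIsalpha cs ∨ 10 < cs.length then false
  else
    match pvLoopA (PySem.List.enumerate cs) 0 with
    | none => false
    | some a => if PySem.Int.mod a 11 = 0 then true else false

-- ===== PORT B =====
-- B's for-loop over the first nine characters: running digit total t and running
-- total-of-totals s; `none` where B does `return False`
def pvLoopB : List Char → Int → Int → Option (Int × Int)
  | [], t, s => some (t, s)
  | c :: rest, t, s =>
    if ¬ PySem.Chars.isdigit c then none
    else pvLoopB rest (t + pvDigitInt c) (s + (t + pvDigitInt c))

def valid_ISBN10_alt (isbn : String) : Bool :=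
  let cs := isbn.toList
  if cs.length ≠ 10 then false
  else
    match pvLoopB (PySem.List.slice cs none (some 9)) 0 0 with
    | none => false
    | some (t, s) =>
      let last := (PySem.List.pyGet? cs 9).getD ' '   -- isbn[9]; in range since length = 10
      if last = 'X' then decide (PySem.Int.mod (s + (t + 10)) 11 = 0)
      else if PySem.Chars.isdigit last then decide (PySem.Int.mod (s + (t + pvDigitInt last)) 11 = 0)
      else false

-- ===== PRECONDITION & SPEC =====
def Spec_valid_ISBN10 (isbn : String) (out : Bool) : Prop := out = valid_ISBN10_alt isbn
instance (isbn : String) (out : Bool) : Decidable (Spec_valid_ISBN10 isbn out) := by unfold Spec_valid_ISBN10; infer_instance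

-- ===== CLAIM (what is proved, stated in full; the proofs are below) =====
def Claim_equal_valid_ISBN10 : Prop := ∀ (isbn : String), Dom_valid_ISBN10 isbn → Spec_valid_ISBN10 isbn (valid_ISBN10 isbn)

-- ===== LEMMAS AND PROOFS =====

theorem not_alpha_of_digit (c : Char) (h : PySem.Chars.isdigit c = true) :
    PySem.Chars.isalpha c = false := by
  simp [PySem.Chars.isdigit, PySem.Chars.isalpha, PySem.Chars.isupper, PySem.Chars.islower,
    Char.le_def, UInt32.le_iff_toNat_le] at *
  omega

theorem ne_X_of_digit (c : Char) (h : PySem.Chars.isdigit c = true) : c ≠ 'X' := by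
  rintro rfl; simp [PySem.Chars.isdigit, Char.le_def] at h

-- A's loop succeeds exactly when every position is a digit or the pair ('X', 9),
-- and then the accumulator has picked up the weighted terms
theorem pvLoopA_eq (ps : List (Int × Char)) (a : Int) :
    pvLoopA ps a =
      if ps.all (fun p => PySem.Chars.isdigit p.2 || (decide (p.2 = 'X') && decide (p.1 = 9)))
      then some (a + (ps.map (fun p =>
        if PySem.Chars.isdigit p.2 then pvDigitInt p.2 * (p.1 + 1) else 10 * (p.1 + 1))).sum)
      else none := by
  induction ps generalizing a with
  | nil => simp [pvLoopA]
  | cons p rest ih =>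
    obtain ⟨i, c⟩ := p
    simp only [pvLoopA, List.all_cons, List.map_cons, List.sum_cons]
    by_cases hd : PySem.Chars.isdigit c = true
    · rw [if_pos hd, ih]
      have hP : (PySem.Chars.isdigit c || (decide (c = 'X') && decide (i = 9))) = true := by
        simp [hd]
      rw [hP, Bool.true_and, if_pos hd]
      split
      · congr 1; ring
      · rfl
    · by_cases hx : c = 'X' ∧ i = 9
      · obtain ⟨rfl, rfl⟩ := hx
        rw [if_neg hd, if_pos ⟨rfl, rfl⟩, ih]
        split
        · rename_i hrest
          simp [hrest, show PySem.Chars.isdigit 'X' = false from by decide]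
          ring
        · rename_i hrest
          simp [show PySem.Chars.isdigit 'X' = false from by decide, hrest]
      · rw [if_neg (by simp [hd]), if_neg hx]
        have hP : (PySem.Chars.isdigit c || (decide (c = 'X') && decide (i = 9))) = false := by
          rcases Decidable.not_and_iff_not_or_not.mp hx with h | h <;> simp [hd, h]
        rw [hP, Bool.false_and, if_neg (by simp)]

-- if some character of the list is not a digit, B's loop bails out with none
theorem pvLoopB_none (cs : List Char) (t s : Int)
    (h : cs.all PySem.Chars.isdigit = false) : pvLoopB cs t s = none := by
  induction cs generalizing t s with
  | nil => simp at h
  | cons c rest ih =>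
    simp only [List.all_cons, Bool.and_eq_false_iff] at h
    rcases h with h | h
    · simp [pvLoopB, h]
    · by_cases hd : PySem.Chars.isdigit c = true
      · simp [pvLoopB, hd, ih _ _ h]
      · simp [pvLoopB, hd]

-- ===== VERDICT (by name: the statement is the Claim_ definition above) =====
set_option maxHeartbeats 1000000 in
theorem valid_ISBN10_spec : Claim_equal_valid_ISBN10 := by
  intro isbn _
  unfold Spec_valid_ISBN10 valid_ISBN10 valid_ISBN10_alt
  rcases h : isbn.toList with _ | ⟨c0, _ | ⟨c1, _ | ⟨c2, _ | ⟨c3, _ | ⟨c4, _ | ⟨c5, _ | ⟨c6, _ | ⟨c7, _ | ⟨c8, _ | ⟨c9, _ | ⟨c10, rest⟩⟩⟩⟩⟩⟩⟩⟩⟩⟩⟩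
  case cons.cons.cons.cons.cons.cons.cons.cons.cons.cons.nil =>
    simp only [pvLoopA_eq]
    norm_num [PySem.List.enumerate, PySem.List.slice, PySem.List.pyGet?, PySem.List.pyIdx?,
      PySem.List.clampIdx, PySem.Chars.strIsalpha,
      List.all_cons, List.map_cons, List.sum_cons, show Int.toNat 9 = 9 from rfl,
      List.take_succ_cons, List.take_zero, List.getElem_cons_succ, List.getElem_cons_zero]
    by_cases H : PySem.Chars.isdigit c0 = true ∧ PySem.Chars.isdigit c1 = true ∧ PySem.Chars.isdigit c2 = true ∧ PySem.Chars.isdigit c3 = true ∧ PySem.Chars.isdigit c4 = true ∧ PySem.Chars.isdigit c5 = true ∧ PySem.Chars.isdigit c6 = true ∧ PySem.Chars.isdigit c7 = true ∧ PySem.Chars.isdigit c8 = true ∧ (PySem.Chars.isdigit c9 = true ∨ c9 = 'X')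
    · obtain ⟨h0, h1, h2, h3, h4, h5, h6, h7, h8, h9⟩ := H
      rw [if_pos ⟨h0, h1, h2, h3, h4, h5, h6, h7, h8, h9⟩]
      rcases h9 with h9 | h9
      · simp [pvLoopB, h0, h1, h2, h3, h4, h5, h6, h7, h8, h9,
          not_alpha_of_digit _ h0, ne_X_of_digit _ h9]
        omega
      · subst h9
        simp [pvLoopB, h0, h1, h2, h3, h4, h5, h6, h7, h8,
          not_alpha_of_digit _ h0, show PySem.Chars.isdigit 'X' = false from by decide]
        omega
    · rw [if_neg H]
      by_cases hb : PySem.Chars.isdigit c0 = true ∧ PySem.Chars.isdigit c1 = true ∧ PySem.Chars.isdigit c2 = true ∧ PySem.Chars.isdigit c3 = true ∧ PySem.Chars.isdigit c4 = true ∧ PySem.Chars.isdigit c5 = true ∧ PySem.Chars.isdigit c6 = true ∧ PySem.Chars.isdigit c7 = true ∧ PySem.Chars.isdigit c8 = true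
      · obtain ⟨h0, h1, h2, h3, h4, h5, h6, h7, h8⟩ := hb
        have h9 : ¬ (PySem.Chars.isdigit c9 = true ∨ c9 = 'X') :=
          fun hor => H ⟨h0, h1, h2, h3, h4, h5, h6, h7, h8, hor⟩
        rw [not_or] at h9
        simp [pvLoopB, h0, h1, h2, h3, h4, h5, h6, h7, h8, h9.1, h9.2]
      · have hall : ([c0, c1, c2, c3, c4, c5, c6, c7, c8].all PySem.Chars.isdigit) = false := by
          cases hx : ([c0, c1, c2, c3, c4, c5, c6, c7, c8].all PySem.Chars.isdigit)
          · rfl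
          · exfalso
            simp only [List.all_cons, List.all_nil, Bool.and_true, Bool.and_eq_true] at hx
            exact hb hx
        simp [pvLoopB_none _ _ _ hall]
  all_goals simp [PySem.Chars.strIsalpha]
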